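-- pv_equiv track=rewrite | github.com/MarkGerber1/skin-advisor | bot/handlers/detailed_palette.py | determine_season
-- ===== SOURCE A (Python) =====
-- from typing import Dict
--
-- def determine_season(answers: Dict[str, str]) -> str:
--     """
--     Определение цветотипа на основе ответов из файла:
--     • Весна – преобладают ответы «а».
--     • Лето – преобладают «b».
--     • Осень – преобладают «c».
--     • Зима – преобладают «d».
--     """
--     scores = {"spring": 0, "summer": 0, "autumn": 0, "winter": 0}
--
--     # Подсчитываем каждый ответ согласно файлу
--     for answer_key, answer_value in answers.items():
--         if answer_value == "a":
--             scores["spring"] += 1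
--         elif answer_value == "b":
--             scores["summer"] += 1
--         elif answer_value == "c":
--             scores["autumn"] += 1
--         elif answer_value == "d":
--             scores["winter"] += 1
--
--     # Определяем победителя
--     max_score = max(scores.values())
--     winners = [season for season, score in scores.items() if score == max_score]
--
--     if len(winners) == 1:
--         return winners[0]
--
--     # При ничьей используем приоритет: Winter > Autumn > Spring > Summer
--     # (основано на контрастности цветотипов)
--     if "winter" in winners:
--         return "winter"
--     elif "autumn" in winners:
--         return "autumn"
--     elif "spring" in winners:
--         return "spring"
--     else:
--         return "summer"
-- ===== SOURCE B (Python) =====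
-- def determine_season(answers):
--     """Scan the four seasons in contrast-priority order (winter > autumn >
--     spring > summer), counting each season's letter with its own .count pass,
--     and keep the first strict maximum: the counting dict, the max/winners
--     computation and the tie-break branch chain all disappear."""
--     values = list(answers.values())
--     best_season, best_count = None, -1
--     for letter, season in (("d", "winter"), ("c", "autumn"), ("a", "spring"), ("b", "summer")):
--         count = values.count(letter)
--         if count > best_count:
--             best_season, best_count = season, count
--     return best_season
-- ===== Notes on version B (the rewrite author's own statement) =====
-- stated objective: simpler
-- what changed: Instead of building a score dict in one pass and then doing max/winners/if-elif tie-breaking, B scans the four seasons in fixed contrast-priority order, counts each letter with a separate list.count pass, and keeps the first strict maximum, so no score dict, no winners list and no tie-break branches exist.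
import Mathlib
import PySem

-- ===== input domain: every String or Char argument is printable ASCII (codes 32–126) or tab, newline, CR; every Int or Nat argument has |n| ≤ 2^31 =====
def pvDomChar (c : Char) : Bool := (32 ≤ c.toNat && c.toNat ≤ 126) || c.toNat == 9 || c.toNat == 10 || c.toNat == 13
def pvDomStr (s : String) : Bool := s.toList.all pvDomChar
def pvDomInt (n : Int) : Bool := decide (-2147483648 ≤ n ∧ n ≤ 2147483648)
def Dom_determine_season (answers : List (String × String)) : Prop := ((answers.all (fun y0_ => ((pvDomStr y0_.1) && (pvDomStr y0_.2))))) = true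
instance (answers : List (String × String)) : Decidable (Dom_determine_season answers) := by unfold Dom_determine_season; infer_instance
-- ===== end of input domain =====

-- B drops A's score dict, winners list and tie-break branch chain: it scans the four seasons
-- in contrast-priority order, counts each letter with its own pass, and keeps the first strict
-- maximum — simpler.

-- ===== PORT A =====
-- the dict argument: the assoc list becomes a Python dict (last value wins per key)
def determine_season (answers : List (String × String)) : String :=
  let d : PySem.Dict String String :=
    answers.foldl (fun d kv => d.insert kv.1 kv.2) PySem.Dict.empty
  let scores0 : PySem.Dict String Int :=
    PySem.Dict.ofList [("spring", 0), ("summer", 0), ("autumn", 0), ("winter", 0)]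
  let scores := d.items.foldl (fun s kv =>
      if kv.2 == "a" then s.modify "spring" 0 (· + 1)
      else if kv.2 == "b" then s.modify "summer" 0 (· + 1)
      else if kv.2 == "c" then s.modify "autumn" 0 (· + 1)
      else if kv.2 == "d" then s.modify "winter" 0 (· + 1)
      else s) scores0
  let maxScore := (PySem.List.max? scores.values (fun x => x)).getD 0  -- values never empty here
  let winners := (scores.items.filter (fun kv => kv.2 == maxScore)).map (fun kv => kv.1)
  if winners.length == 1 then winners.headD ""  -- winners never empty here
  else if winners.contains "winter" then "winter"
  else if winners.contains "autumn" then "autumn"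
  else if winners.contains "spring" then "spring"
  else "summer"

-- ===== PORT B =====
def determine_season_alt (answers : List (String × String)) : String :=
  let d : PySem.Dict String String :=
    answers.foldl (fun d kv => d.insert kv.1 kv.2) PySem.Dict.empty
  let values := d.values
  let r := ([("d", "winter"), ("c", "autumn"), ("a", "spring"), ("b", "summer")] :
      List (String × String)).foldl
    (fun (acc : Option String × Int) p =>
      let c : Int := (PySem.List.count values p.1 : Int)
      if c > acc.2 then (some p.2, c) else acc) (none, -1)
  r.1.getD ""  -- best_season is always set (first count ≥ 0 > -1)

-- ===== PRECONDITION & SPEC =====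
def Spec_determine_season (answers : List (String × String)) (out : String) : Prop := out = determine_season_alt answers
instance (answers : List (String × String)) (out : String) : Decidable (Spec_determine_season answers out) := by unfold Spec_determine_season; infer_instance

-- ===== CLAIM (what is proved, stated in full; the proofs are below) =====
def Claim_equal_determine_season : Prop := ∀ (answers : List (String × String)), Dom_determine_season answers → Spec_determine_season answers (determine_season answers)

-- ===== LEMMAS AND PROOFS =====

-- the four-season score dict with symbolic counts
def dict4 (sp su au wi : Int) : PySem.Dict String Int :=
  PySem.Dict.mk [("spring", sp), ("summer", su), ("autumn", au), ("winter", wi)]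

lemma modify_spring (sp su au wi : Int) :
    (dict4 sp su au wi).modify "spring" 0 (· + 1) = dict4 (sp + 1) su au wi := rfl
lemma modify_summer (sp su au wi : Int) :
    (dict4 sp su au wi).modify "summer" 0 (· + 1) = dict4 sp (su + 1) au wi := rfl
lemma modify_autumn (sp su au wi : Int) :
    (dict4 sp su au wi).modify "autumn" 0 (· + 1) = dict4 sp su (au + 1) wi := rfl
lemma modify_winter (sp su au wi : Int) :
    (dict4 sp su au wi).modify "winter" 0 (· + 1) = dict4 sp su au (wi + 1) := rfl

lemma scores0_eq : (PySem.Dict.ofList [("spring", (0:Int)), ("summer", 0), ("autumn", 0), ("winter", 0)]) = dict4 0 0 0 0 := by decide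

-- A's counting loop over the items list, with a symbolic dict4 accumulator
lemma foldA_dict4 (vs : List (String × String)) (sp su au wi : Int) :
    vs.foldl (fun s kv =>
      if kv.2 == "a" then s.modify "spring" 0 (· + 1)
      else if kv.2 == "b" then s.modify "summer" 0 (· + 1)
      else if kv.2 == "c" then s.modify "autumn" 0 (· + 1)
      else if kv.2 == "d" then s.modify "winter" 0 (· + 1)
      else s) (dict4 sp su au wi)
    = dict4 (sp + (vs.countP (fun kv => kv.2 == "a") : Int))
            (su + (vs.countP (fun kv => kv.2 == "b") : Int))
            (au + (vs.countP (fun kv => kv.2 == "c") : Int))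
            (wi + (vs.countP (fun kv => kv.2 == "d") : Int)) := by
  induction vs generalizing sp su au wi with
  | nil => simp
  | cons kv vs ih =>
    simp only [List.foldl_cons, List.countP_cons]
    by_cases h1 : kv.2 = "a"
    · rw [h1]
      simp only [String.reduceBEq, Bool.false_eq_true, eq_self_iff_true, ite_true, ite_false, reduceIte, modify_spring, ih]
      simp only [String.reduceBEq, Bool.false_eq_true, eq_self_iff_true, ite_true, ite_false,
        reduceIte, dict4, PySem.Dict.mk.injEq, List.cons.injEq, Prod.mk.injEq, and_true, true_and]
      omega
    by_cases h2 : kv.2 = "b"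
    · rw [h2]
      simp only [String.reduceBEq, Bool.false_eq_true, eq_self_iff_true, ite_true, ite_false, reduceIte, modify_summer, ih]
      simp only [String.reduceBEq, Bool.false_eq_true, eq_self_iff_true, ite_true, ite_false,
        reduceIte, dict4, PySem.Dict.mk.injEq, List.cons.injEq, Prod.mk.injEq, and_true, true_and]
      omega
    by_cases h3 : kv.2 = "c"
    · rw [h3]
      simp only [String.reduceBEq, Bool.false_eq_true, eq_self_iff_true, ite_true, ite_false, reduceIte, modify_autumn, ih]
      simp only [String.reduceBEq, Bool.false_eq_true, eq_self_iff_true, ite_true, ite_false,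
        reduceIte, dict4, PySem.Dict.mk.injEq, List.cons.injEq, Prod.mk.injEq, and_true, true_and]
      omega
    by_cases h4 : kv.2 = "d"
    · rw [h4]
      simp only [String.reduceBEq, Bool.false_eq_true, eq_self_iff_true, ite_true, ite_false, reduceIte, modify_winter, ih]
      simp only [String.reduceBEq, Bool.false_eq_true, eq_self_iff_true, ite_true, ite_false,
        reduceIte, dict4, PySem.Dict.mk.injEq, List.cons.injEq, Prod.mk.injEq, and_true, true_and]
      omega
    · rw [if_neg (show ¬(kv.2 == "a") = true by simp [h1]),
          if_neg (show ¬(kv.2 == "b") = true by simp [h2]),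
          if_neg (show ¬(kv.2 == "c") = true by simp [h3]),
          if_neg (show ¬(kv.2 == "d") = true by simp [h4]), ih]
      simp only [beq_iff_eq, h1, h2, h3, h4, Bool.false_eq_true, eq_self_iff_true, ite_true, ite_false, reduceIte, dict4, PySem.Dict.mk.injEq,
        List.cons.injEq, Prod.mk.injEq, and_true, true_and]
      omega

-- counting a value in the second components
lemma count_snd (vs : List (String × String)) (v : String) :
    PySem.List.count (vs.map (fun kv => kv.2)) v = vs.countP (fun kv => kv.2 == v) := by
  simp only [PySem.List.count_eq, List.count_eq_countP, List.countP_map]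
  rfl

-- A's selection tail equals B's priority-ordered scan, for any counts
set_option maxHeartbeats 4000000 in
set_option maxRecDepth 8192 in
lemma select_eq (sp su au wi : Nat) :
    (let scores := dict4 sp su au wi
     let maxScore := (PySem.List.max? scores.values (fun x => x)).getD 0
     let winners := (scores.items.filter (fun kv => kv.2 == maxScore)).map (fun kv => kv.1)
     if winners.length == 1 then winners.headD ""
     else if winners.contains "winter" then "winter"
     else if winners.contains "autumn" then "autumn"
     else if winners.contains "spring" then "spring"
     else "summer")
    = (([("d", "winter"), ("c", "autumn"), ("a", "spring"), ("b", "summer")] :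
        List (String × String)).foldl
        (fun (acc : Option String × Int) p =>
          let c : Int := (if p.1 = "d" then (wi : Int) else if p.1 = "c" then (au : Int)
            else if p.1 = "a" then (sp : Int) else (su : Int))
          if c > acc.2 then (some p.2, c) else acc) (none, -1)).1.getD "" := by
  simp only [dict4, PySem.Dict.values_mk, PySem.Dict.items, List.map_cons, List.map_nil,
    PySem.List.max?_id_cons, List.foldl_cons, List.foldl_nil, String.reduceEq, reduceIte,
    Option.getD_some, List.filter_cons, List.filter_nil,
    beq_iff_eq, decide_eq_true_eq, gt_iff_lt]
  have hmem : max (max (max (sp:Int) su) au) wi = sp ∨ max (max (max (sp:Int) su) au) wi = su ∨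
      max (max (max (sp:Int) su) au) wi = au ∨ max (max (max (sp:Int) su) au) wi = wi := by
    rcases max_choice (max (max (sp:Int) su) au) (wi:Int) with h | h
    · rw [h]
      rcases max_choice (max (sp:Int) su) (au:Int) with h' | h'
      · rw [h']
        rcases max_choice (sp:Int) (su:Int) with h'' | h'' <;> rw [h''] <;> tauto
      · rw [h']; tauto
    · rw [h]; tauto
  have h1 : (sp:Int) ≤ max (max (max (sp:Int) su) au) wi := by simp
  have h2 : (su:Int) ≤ max (max (max (sp:Int) su) au) wi := by simp
  have h3 : (au:Int) ≤ max (max (max (sp:Int) su) au) wi := by simp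
  have h4 : (wi:Int) ≤ max (max (max (sp:Int) su) au) wi := by simp
  generalize hM : max (max (max (sp:Int) su) au) wi = M at *
  clear hM
  split_ifs <;> (try dsimp only []) <;> (try split_ifs) <;> (try dsimp only []) <;> (try split_ifs) <;>
    simp_all only [List.map_cons, List.map_nil, List.length_cons, List.length_nil,
      List.headD_cons, List.contains_cons, List.contains_nil, List.elem_cons, List.elem_nil,
      beq_iff_eq, String.reduceEq, Bool.or_eq_true, decide_eq_true_eq, or_false, false_or,
      or_true, true_or, Option.getD_some, lt_self_iff_false, not_lt,
      Bool.false_eq_true, not_false_eq_true, or_self, not_true, not_false_iff] <;>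
    omega

-- ===== VERDICT (by name: the statement is the Claim_ definition above) =====
theorem determine_season_spec : Claim_equal_determine_season := by
  intro answers _
  unfold Spec_determine_season
  simp only [determine_season, determine_season_alt, scores0_eq]
  rw [show ∀ d : PySem.Dict String String, d.values = d.items.map (fun kv => kv.2) from fun _ => rfl]
  rw [foldA_dict4]
  simp only [zero_add, count_snd, String.reduceEq, reduceIte]
  exact select_eq _ _ _ _
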